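-- pv_equiv track=rewrite | github.com/fandcomp/GuardSurfing-Extension-for-URL-Phishing | back-end/server.py | looks_like_brand
-- ===== SOURCE A (Python) =====
-- def looks_like_brand(s: str, brand: str) -> bool:
--     """Check if string s looks like brand using simple substitutions (0->o, 1->l/i, 3->e, 5->s, 7->t)."""
--     if not s or not brand:
--         return False
--     s0 = s.lower()
--     b0 = brand.lower()
--     subs = str.maketrans({'0':'o','1':'l','3':'e','5':'s','7':'t','!':'i','$':'s','@':'a'})
--     s1 = s0.translate(subs)
--     # Direct match after substitutions or small edit distance
--     if s1 == b0:
--         return True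
--     # Levenshtein distance <= 1
--     if abs(len(s1) - len(b0)) > 1:
--         return False
--     # simple distance 0/1 check
--     mism = 0
--     i=j=0
--     while i < len(s1) and j < len(b0):
--         if s1[i] == b0[j]:
--             i+=1; j+=1
--         else:
--             mism += 1
--             if mism > 1:
--                 return False
--             # try skip one in either
--             if len(s1) > len(b0):
--                 i+=1
--             elif len(b0) > len(s1):
--                 j+=1
--             else:
--                 i+=1; j+=1
--     if i < len(s1) or j < len(b0):
--         mism += 1
--     return mism <= 1
-- ===== SOURCE B (Python) =====
-- def looks_like_brand(s: str, brand: str) -> bool: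
--     """One-edit check via longest-common-prefix and direct suffix comparison
--     (instead of A's greedy mismatch-counting scan)."""
--     if not s or not brand:
--         return False
--     subs = str.maketrans({'0':'o','1':'l','3':'e','5':'s','7':'t','!':'i','$':'s','@':'a'})
--     s1 = s.lower().translate(subs)
--     b0 = brand.lower()
--     if abs(len(s1) - len(b0)) > 1:
--         return False
--     a, b = (s1, b0) if len(s1) <= len(b0) else (b0, s1)
--     k = 0
--     while k < len(a) and a[k] == b[k]:
--         k += 1
--     if len(a) == len(b):
--         return k >= len(a) or a[k+1:] == b[k+1:]
--     return a[k:] == b[k+1:]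
-- ===== Notes on version B (the rewrite author's own statement) =====
-- stated objective: alternative
-- what changed: The greedy two-pointer scan with a mismatch counter is replaced by computing the longest common prefix and then comparing the remaining suffixes directly (the classic one-edit-distance decomposition); the guard, lowercasing and substitution table are kept.
import Mathlib
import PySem

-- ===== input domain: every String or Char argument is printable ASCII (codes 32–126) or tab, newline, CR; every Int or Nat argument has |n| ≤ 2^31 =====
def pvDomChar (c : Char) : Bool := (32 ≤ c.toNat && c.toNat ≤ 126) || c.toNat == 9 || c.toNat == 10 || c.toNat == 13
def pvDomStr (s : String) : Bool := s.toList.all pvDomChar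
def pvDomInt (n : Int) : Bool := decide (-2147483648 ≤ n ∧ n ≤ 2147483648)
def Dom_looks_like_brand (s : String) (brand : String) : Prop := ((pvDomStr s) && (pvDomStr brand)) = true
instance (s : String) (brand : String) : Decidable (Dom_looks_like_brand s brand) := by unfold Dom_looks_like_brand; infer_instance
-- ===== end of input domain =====

-- B replaces A's greedy mismatch-counting two-pointer scan by a longest-common-prefix
-- computation followed by direct suffix comparison (objective: alternative decomposition).


-- ===== PORT A =====
-- the substitution table subs = {'0':'o','1':'l','3':'e','5':'s','7':'t','!':'i','$':'s','@':'a'}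
def pvSubs (c : Char) : Char :=
  if c = '0' then 'o' else if c = '1' then 'l' else if c = '3' then 'e'
  else if c = '5' then 's' else if c = '7' then 't' else if c = '!' then 'i'
  else if c = '$' then 's' else if c = '@' then 'a' else c

-- A's while loop: i/j index the remaining suffixes, xlen/ylen are len(s1)/len(b0)
def pvLoopA (xlen ylen : Nat) : List Char → List Char → Nat → Bool
  | x :: xs, y :: ys, mism =>
    if x = y then pvLoopA xlen ylen xs ys mism
    else if mism + 1 > 1 then false
    else if ylen < xlen then pvLoopA xlen ylen xs (y :: ys) (mism + 1)
    else if xlen < ylen then pvLoopA xlen ylen (x :: xs) ys (mism + 1)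
    else pvLoopA xlen ylen xs ys (mism + 1)
  | xs, ys, mism => (if xs ≠ [] ∨ ys ≠ [] then mism + 1 else mism) ≤ 1
termination_by xs ys _ => xs.length + ys.length
decreasing_by all_goals (simp only [List.length_cons]; omega)

def looks_like_brand (s : String) (brand : String) : Bool :=
  if s.toList = [] ∨ brand.toList = [] then false
  else
    let s0 := PySem.Chars.lower s.toList
    let b0 := PySem.Chars.lower brand.toList
    let s1 := s0.map pvSubs
    if s1 = b0 then true
    else if 1 < ((s1.length : Int) - (b0.length : Int)).natAbs then false
    else pvLoopA s1.length b0.length s1 b0 0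

-- ===== PORT B =====
-- the while loop 'k = 0; while k < len(a) and a[k] == b[k]: k += 1'
def pvCpl : List Char → List Char → Nat
  | x :: xs, y :: ys => if x = y then pvCpl xs ys + 1 else 0
  | _, _ => 0

def looks_like_brand_alt (s : String) (brand : String) : Bool :=
  if s.toList = [] ∨ brand.toList = [] then false
  else
    let s1 := (PySem.Chars.lower s.toList).map pvSubs
    let b0 := PySem.Chars.lower brand.toList
    if 1 < ((s1.length : Int) - (b0.length : Int)).natAbs then false
    else
      let (a, b) := if s1.length ≤ b0.length then (s1, b0) else (b0, s1)
      let k := pvCpl a b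
      if a.length = b.length then decide (k ≥ a.length) || decide (a.drop (k+1) = b.drop (k+1))
      else decide (a.drop k = b.drop (k+1))

-- ===== PRECONDITION & SPEC =====
def Spec_looks_like_brand (s : String) (brand : String) (out : Bool) : Prop := out = looks_like_brand_alt s brand
instance (s : String) (brand : String) (out : Bool) : Decidable (Spec_looks_like_brand s brand out) := by unfold Spec_looks_like_brand; infer_instance

-- ===== CLAIM (what is proved, stated in full; the proofs are below) =====
def Claim_equal_looks_like_brand : Prop := ∀ (s : String) (brand : String), Dom_looks_like_brand s brand → Spec_looks_like_brand s brand (looks_like_brand s brand)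

-- ===== LEMMAS AND PROOFS =====

-- after one skip the lengths agree; with mism = 1 the loop is a plain equality scan
theorem pvLoopA_one {xs ys : List Char} (h : xs.length = ys.length) (n m : Nat) :
    pvLoopA n m xs ys 1 = decide (xs = ys) := by
  induction xs generalizing ys with
  | nil =>
    cases ys with
    | nil => simp [pvLoopA]
    | cons y ys => simp at h
  | cons x xs ih =>
    cases ys with
    | nil => simp at h
    | cons y ys =>
      simp only [List.length_cons, Nat.add_right_cancel_iff] at h
      by_cases hxy : x = y
      · subst hxy; rw [pvLoopA]; simp [ih h]
      · rw [pvLoopA]; simp [hxy]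

theorem pvCpl_self (xs : List Char) : pvCpl xs xs = xs.length := by
  induction xs with
  | nil => simp [pvCpl]
  | cons x xs ih => simp [pvCpl, ih]

-- equal full lengths: the loop is a Hamming-distance ≤ 1 check = B's equal-length branch
theorem pvLoopA_eq {xs ys : List Char} (h : xs.length = ys.length) (n : Nat) :
    pvLoopA n n xs ys 0 =
      (decide (pvCpl xs ys ≥ xs.length) || decide (xs.drop (pvCpl xs ys + 1) = ys.drop (pvCpl xs ys + 1))) := by
  induction xs generalizing ys with
  | nil =>
    cases ys with
    | nil => simp [pvLoopA, pvCpl]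
    | cons y ys => simp at h
  | cons x xs ih =>
    cases ys with
    | nil => simp at h
    | cons y ys =>
      simp only [List.length_cons, Nat.add_right_cancel_iff] at h
      by_cases hxy : x = y
      · subst hxy
        rw [pvLoopA, ih h]
        simp [pvCpl, List.drop_succ_cons, ge_iff_le]
      · rw [pvLoopA]
        simp only [hxy, if_false, Nat.lt_irrefl, pvLoopA_one h]
        simp [pvCpl, hxy]

-- xs one longer: the loop skips in xs = B's unequal branch with (a,b) = (ys,xs)
theorem pvLoopA_gt {xs ys : List Char} (h : xs.length = ys.length + 1) {n m : Nat} (hm : m < n) :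
    pvLoopA n m xs ys 0 = decide (ys.drop (pvCpl ys xs) = xs.drop (pvCpl ys xs + 1)) := by
  induction ys generalizing xs with
  | nil =>
    cases xs with
    | nil => simp at h
    | cons x xs =>
      have hx : xs = [] := by simpa using h
      subst hx; simp [pvLoopA, pvCpl]
  | cons y ys ih =>
    cases xs with
    | nil => simp at h
    | cons x xs =>
      have h2 : xs.length = ys.length + 1 := by simpa using h
      by_cases hxy : x = y
      · subst hxy
        rw [pvLoopA, ih h2]
        simp [pvCpl, List.drop_succ_cons]
      · rw [pvLoopA]
        have hlen : xs.length = (y :: ys).length := by simp [h2]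
        simp only [hxy, if_false, hm, if_true, pvLoopA_one hlen]
        have : pvCpl (y :: ys) (x :: xs) = 0 := by
          simp [pvCpl, Ne.symm hxy]
        simp [this, eq_comm]

-- ys one longer: the loop skips in ys = B's unequal branch with (a,b) = (xs,ys)
theorem pvLoopA_lt {xs ys : List Char} (h : ys.length = xs.length + 1) {n m : Nat} (hm : n < m) :
    pvLoopA n m xs ys 0 = decide (xs.drop (pvCpl xs ys) = ys.drop (pvCpl xs ys + 1)) := by
  induction xs generalizing ys with
  | nil =>
    cases ys with
    | nil => simp at h
    | cons y ys =>
      have hy : ys = [] := by simpa using h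
      subst hy; simp [pvLoopA, pvCpl]
  | cons x xs ih =>
    cases ys with
    | nil => simp at h
    | cons y ys =>
      have h2 : ys.length = xs.length + 1 := by simpa using h
      by_cases hxy : x = y
      · subst hxy
        rw [pvLoopA, ih h2]
        simp [pvCpl, List.drop_succ_cons]
      · rw [pvLoopA]
        have hlen : (x :: xs).length = ys.length := by simp [h2]
        simp only [hxy, if_false, hm, if_true, Nat.lt_asymm hm, pvLoopA_one hlen]
        simp [pvCpl, hxy]

-- the shared tail of both ports, on the translated char lists
theorem pvCore (xs ys : List Char) :
    (if xs = ys then true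
     else if 1 < ((xs.length : Int) - (ys.length : Int)).natAbs then false
     else pvLoopA xs.length ys.length xs ys 0)
    = (if 1 < ((xs.length : Int) - (ys.length : Int)).natAbs then false
       else
         let (a, b) := if xs.length ≤ ys.length then (xs, ys) else (ys, xs)
         let k := pvCpl a b
         if a.length = b.length then decide (k ≥ a.length) || decide (a.drop (k+1) = b.drop (k+1))
         else decide (a.drop k = b.drop (k+1))) := by
  by_cases habs : 1 < ((xs.length : Int) - (ys.length : Int)).natAbs
  · have hne : xs ≠ ys := by
      intro hEq; subst hEq; simp at habs
    simp [habs, hne]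
  · simp only [habs, if_false]
    have h3 : xs.length = ys.length ∨ xs.length = ys.length + 1 ∨ ys.length = xs.length + 1 := by
      omega
    rcases h3 with hEq | hGt | hLt
    · by_cases hxy : xs = ys
      · subst hxy
        simp [pvCpl_self]
      · simp only [hxy, if_false, hEq, le_refl, if_true, pvLoopA_eq hEq]
    · have hne : xs ≠ ys := by intro hEq; subst hEq; omega
      have hnle : ¬ xs.length ≤ ys.length := by omega
      simp only [hne, if_false, hnle, pvLoopA_gt hGt (show ys.length < xs.length by omega)]
      have : ¬ ys.length = xs.length := by omega
      simp [this]
    · have hne : xs ≠ ys := by intro hEq; subst hEq; omega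
      have hle : xs.length ≤ ys.length := by omega
      simp only [hne, if_false, hle, if_true, pvLoopA_lt hLt (show xs.length < ys.length by omega)]
      have : ¬ xs.length = ys.length := by omega
      simp [this]

-- ===== VERDICT (by name: the statement is the Claim_ definition above) =====
theorem looks_like_brand_spec : Claim_equal_looks_like_brand := by
  intro s brand _
  unfold Spec_looks_like_brand looks_like_brand looks_like_brand_alt
  by_cases hguard : s.toList = [] ∨ brand.toList = []
  · rw [if_pos hguard, if_pos hguard]
  · rw [if_neg hguard, if_neg hguard]
    exact pvCore ((PySem.Chars.lower s.toList).map pvSubs) (PySem.Chars.lower brand.toList)
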